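-- pv_equiv track=rewrite | github.com/rjmoggach/python-moshion | moshion/extractframes/rateconverter.py | take_last_assignment
-- ===== SOURCE A (Python) =====
-- def take_last_assignment(source):
--     first = True
--     last = None
--     for assn in source:
--         if first:
--             last = assn
--             first = False
--         if assn[1] != last[1]:
--             yield last
--         last = assn
--     if last is not None:
--         yield last
-- ===== SOURCE B (Python) =====
-- def _runs(items):
--     # segment the stream into maximal consecutive runs of equal second elements
--     buf = []
--     for item in items:
--         if buf and buf[-1][1] != item[1]:
--             yield buf
--             buf = []
--         buf.append(item)
--     if buf:
--         yield buf
--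
-- def take_last_assignment(source):
--     for run in _runs(source):
--         yield run[-1]
-- ===== Notes on version B (the rewrite author's own statement) =====
-- stated objective: alternative
-- what changed: B segments the stream into maximal runs of equal keys with a separate grouping generator and then yields each run's last element, instead of A's single stateful loop with a first/last pointer and a compare-to-previous boundary test.
import Mathlib
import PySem

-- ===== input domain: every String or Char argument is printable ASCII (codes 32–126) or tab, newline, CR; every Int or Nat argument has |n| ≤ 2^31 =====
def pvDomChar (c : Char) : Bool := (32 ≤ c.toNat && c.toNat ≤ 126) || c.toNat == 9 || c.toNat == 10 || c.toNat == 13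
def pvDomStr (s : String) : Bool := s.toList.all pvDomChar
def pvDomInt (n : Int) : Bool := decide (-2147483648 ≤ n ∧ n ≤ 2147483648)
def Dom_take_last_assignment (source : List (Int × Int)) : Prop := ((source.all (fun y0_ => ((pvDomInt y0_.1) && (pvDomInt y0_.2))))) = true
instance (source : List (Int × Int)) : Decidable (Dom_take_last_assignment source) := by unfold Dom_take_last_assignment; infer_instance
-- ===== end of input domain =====

-- B groups the stream into maximal runs of equal keys and yields each run's last element,
-- instead of A's stateful first/last pointer loop; same O(n) cost (return value only; A/B are generators).


-- ===== PORT A =====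
-- the for-loop threading (first, last, out); 'last[1]' is only evaluated after 'last' was set,
-- the 'none' branch of the match is unreachable (Python would raise TypeError there, never reached).
def takeLastGoA (first : Bool) (last : Option (Int × Int)) (out : List (Int × Int)) :
    List (Int × Int) → List (Int × Int)
  | [] => match last with
          | some l => out ++ [l]        -- 'if last is not None: yield last'
          | none => out
  | assn :: rest =>
      let last1 := if first then some assn else last
      let first1 := if first then false else first
      let out1 := match last1 with
                  | some l => if assn.2 ≠ l.2 then out ++ [l] else out
                  | none => out
      takeLastGoA first1 (some assn) out1 rest

def take_last_assignment (source : List (Int × Int)) : List (Int × Int) :=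
  takeLastGoA true none [] source

-- ===== PORT B =====
-- '_runs': the grouping generator's loop threading (buf, out); 'buf[-1]' on the nonempty buf is its last element
def runsGoB (buf : List (Int × Int)) (out : List (List (Int × Int))) :
    List (Int × Int) → List (List (Int × Int))
  | [] => if buf ≠ [] then out ++ [buf] else out        -- 'if buf: yield buf'
  | item :: rest =>
      match buf.getLast? with
      | some l =>
          if l.2 ≠ item.2 then runsGoB [item] (out ++ [buf]) rest   -- yield buf; buf = []; buf.append(item)
          else runsGoB (buf ++ [item]) out rest
      | none => runsGoB (buf ++ [item]) out rest        -- 'buf' falsy: just append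

-- 'yield run[-1]' for each run: every run is nonempty, so run[-1] is getLast? and filterMap drops nothing
def take_last_assignment_alt (source : List (Int × Int)) : List (Int × Int) :=
  (runsGoB [] [] source).filterMap List.getLast?

-- ===== PRECONDITION & SPEC =====
def Spec_take_last_assignment (source : List (Int × Int)) (out : List (Int × Int)) : Prop := out = take_last_assignment_alt source
instance (source : List (Int × Int)) (out : List (Int × Int)) : Decidable (Spec_take_last_assignment source out) := by unfold Spec_take_last_assignment; infer_instance

-- ===== CLAIM (what is proved, stated in full; the proofs are below) =====
def Claim_equal_take_last_assignment : Prop := ∀ (source : List (Int × Int)), Dom_take_last_assignment source → Spec_take_last_assignment source (take_last_assignment source)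

-- ===== LEMMAS AND PROOFS =====

-- canonical form: boundary emissions for the run l :: xs, ending with the final element
def takeLastEmits : (Int × Int) → List (Int × Int) → List (Int × Int)
  | l, [] => [l]
  | l, y :: r => (if y.2 ≠ l.2 then [l] else []) ++ takeLastEmits y r

theorem takeLastGoA_emits (xs : List (Int × Int)) :
    ∀ (l : Int × Int) (out : List (Int × Int)),
      takeLastGoA false (some l) out xs = out ++ takeLastEmits l xs := by
  induction xs with
  | nil => intro l out; simp [takeLastGoA, takeLastEmits]
  | cons y r ih =>
      intro l out
      by_cases h : y.2 = l.2 <;> simp [takeLastGoA, takeLastEmits, h, ih]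

theorem runsGoB_emits (xs : List (Int × Int)) :
    ∀ (buf : List (Int × Int)) (out : List (List (Int × Int))) (l : Int × Int),
      buf.getLast? = some l →
      (runsGoB buf out xs).filterMap List.getLast?
        = out.filterMap List.getLast? ++ takeLastEmits l xs := by
  induction xs with
  | nil =>
      intro buf out l h
      have hne : buf ≠ [] := by intro e; simp [e] at h
      simp [runsGoB, hne, takeLastEmits, h]
  | cons y r ih =>
      intro buf out l h
      by_cases hk : l.2 = y.2
      · have : runsGoB buf out (y :: r) = runsGoB (buf ++ [y]) out r := by
          simp [runsGoB, h, hk]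
        rw [this, ih (buf ++ [y]) out y (by simp)]
        simp [takeLastEmits, hk]
      · have : runsGoB buf out (y :: r) = runsGoB [y] (out ++ [buf]) r := by
          simp [runsGoB, h, hk]
        rw [this, ih [y] (out ++ [buf]) y (by simp)]
        simp [takeLastEmits, h, show ¬ y.2 = l.2 from fun e => hk e.symm]

-- ===== VERDICT (by name: the statement is the Claim_ definition above) =====
theorem take_last_assignment_spec : Claim_equal_take_last_assignment := by
  intro source _
  show take_last_assignment source = take_last_assignment_alt source
  cases source with
  | nil => rfl
  | cons x xs =>
      have hA : take_last_assignment (x :: xs) = takeLastGoA false (some x) [] xs := by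
        simp [take_last_assignment, takeLastGoA]
      have hB : take_last_assignment_alt (x :: xs)
          = (runsGoB [x] [] xs).filterMap List.getLast? := by
        simp [take_last_assignment_alt, runsGoB]
      rw [hA, takeLastGoA_emits, hB, runsGoB_emits xs [x] [] x (by simp)]
      simp
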